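-- pv_equiv track=rewrite | github.com/yair-shtern/Intro2CS | ex5/wordsearch.py | check_down
-- ===== SOURCE A (Python) =====
-- def count_word(word,string):
--     """
--     Count the appearance of word in string (at list 1)
--     :param: word: a word to search in string
--     :param: string: a string
--     :return: the count of appearance of word in string
--     """
--     count = 1
--     short_string = string[string.find(word) + 1:]
--     while string != '':
--         if word in short_string:
--             count += 1
--             short_string = short_string[short_string.find(word) + 1:]
--         else:
--             break
--     return count
--
-- def check_and_update(result_dict,string,word_list):
--     """
--     Check if word in a string and update in the result dict
--     :param: result_dict: a dict with the result of the word founds so far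
--     :param: string: a string
--     :param: word_list: a list of word to check if in the string
--     :return: None
--     """
--     for word in word_list:
--         if word in string:
--             if word in result_dict:
--                 result_dict[word] += count_word(word,string)
--             else:
--                 result_dict[word] = count_word(word,string)
--     return
--
-- def check_down(result_dict,word_list,matrix):
--     """
--      Check if words in the matrix in direction - down
--      :param: result_dict: a dict with the result of the word founds so far
--      :param: word_list: a list of words
--      :param: matrix: a matrix to check on
--      :return: the updated dict
--      """
--     for j in range(len(matrix[0])):
--         i = 0
--         string = ''
--         while i < len(matrix):
--             string += matrix[i][j]
--             i += 1
--         check_and_update(result_dict,string,word_list)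
--     return result_dict
-- ===== SOURCE B (Python) =====
-- def check_down(result_dict, word_list, matrix):
--     for j in range(len(matrix[0])):
--         col = ''.join(matrix[i][j] for i in range(len(matrix)))
--         for word in word_list:
--             cnt = 0
--             for s in range(len(col) - len(word) + 1):
--                 if col[s:s + len(word)] == word:
--                     cnt += 1
--             if cnt > 0:
--                 result_dict[word] = result_dict.get(word, 0) + cnt
--     return result_dict
-- ===== Notes on version B (the rewrite author's own statement) =====
-- stated objective: alternative
-- what changed: Replaces A's count_word find-advance-and-break loop (plus the membership-gated dict branch pair) by a direct windowed start-index scan col[s:s+len(word)]==word per column, builds each column string with join over a range instead of a while-loop of string concatenations, and updates the dict with a single get(word,0)+cnt insert.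
import Mathlib
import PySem

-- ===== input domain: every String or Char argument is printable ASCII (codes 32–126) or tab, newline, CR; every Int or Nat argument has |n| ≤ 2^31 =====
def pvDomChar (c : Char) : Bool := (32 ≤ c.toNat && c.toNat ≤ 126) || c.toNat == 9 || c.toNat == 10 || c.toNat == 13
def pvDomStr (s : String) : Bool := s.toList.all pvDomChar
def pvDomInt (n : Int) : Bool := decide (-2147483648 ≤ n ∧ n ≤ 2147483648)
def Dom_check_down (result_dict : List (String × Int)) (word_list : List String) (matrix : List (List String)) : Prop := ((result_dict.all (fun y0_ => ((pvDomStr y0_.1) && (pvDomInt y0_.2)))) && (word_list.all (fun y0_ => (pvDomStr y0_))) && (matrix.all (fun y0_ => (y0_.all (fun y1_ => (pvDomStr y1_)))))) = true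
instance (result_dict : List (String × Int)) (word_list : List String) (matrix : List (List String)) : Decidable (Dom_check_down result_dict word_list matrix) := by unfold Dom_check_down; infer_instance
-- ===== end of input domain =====

-- B replaces A's find-advance count_word loop by a windowed start-index scan per column and a
-- single get(word,0)+cnt dict insert; both Pythons mutate result_dict in place, the equivalence
-- proved here is about the returned dict's items.


-- ===== PORT A =====
-- A's while-loop inside count_word; the fuel argument only makes the recursion total
-- (for word ≠ '' the loop makes at most len(string)+1 steps, see lemmas below).
def count_word_loop (word : List Char) : Nat → List Char → Int → Int
  | 0, _, count => count
  | fuel + 1, short, count =>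
    if PySem.Chars.isIn word short then
      count_word_loop word fuel
        (PySem.Chars.slice short (some (PySem.Chars.find short word + 1)) none) (count + 1)
    else count

def count_word (word string : List Char) : Int :=
  let short := PySem.Chars.slice string (some (PySem.Chars.find string word + 1)) none
  if string = [] then 1 else count_word_loop word (string.length + 1) short 1

def check_and_update (result_dict : PySem.Dict String Int) (string : List Char)
    (word_list : List String) : PySem.Dict String Int :=
  word_list.foldl (fun d word =>
    if PySem.Chars.isIn word.toList string then
      if d.contains word then d.modify word 0 (fun v => v + count_word word.toList string)
      else d.insert word (count_word word.toList string)
    else d) result_dict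

def check_down (result_dict : List (String × Int)) (word_list : List String)
    (matrix : List (List String)) : List (String × Int) :=
  ((PySem.List.pyRange 0 ((PySem.List.pyGetD matrix 0 []).length : Int) 1).foldl
    (fun d j =>
      let string := (PySem.List.pyRange 0 ((matrix.length : Int)) 1).foldl
        (fun s i => s ++ (PySem.List.pyGetD (PySem.List.pyGetD matrix i []) j "").toList)
        ([] : List Char)
      check_and_update d string word_list)
    (PySem.Dict.mk result_dict)).items

-- ===== PORT B =====
-- cnt = 0; for s in range(len(col)-len(word)+1): if col[s:s+len(word)] == word: cnt += 1
def count_windows (word col : List Char) : Int :=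
  (PySem.List.pyRange 0 ((col.length : Int) - (word.length : Int) + 1) 1).foldl
    (fun cnt s =>
      if PySem.List.slice col (some s) (some (s + (word.length : Int))) = word then cnt + 1
      else cnt) 0

def check_down_alt (result_dict : List (String × Int)) (word_list : List String)
    (matrix : List (List String)) : List (String × Int) :=
  ((PySem.List.pyRange 0 ((PySem.List.pyGetD matrix 0 []).length : Int) 1).foldl
    (fun d j =>
      -- col = ''.join(matrix[i][j] for i in range(len(matrix)))
      let col := (PySem.List.pyRange 0 ((matrix.length : Int)) 1).flatMap
        (fun i => (PySem.List.pyGetD (PySem.List.pyGetD matrix i []) j "").toList)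
      word_list.foldl (fun d word =>
        let cnt := count_windows word.toList col
        if cnt > 0 then d.insert word (d.getD word 0 + cnt) else d) d)
    (PySem.Dict.mk result_dict)).items

-- ===== PRECONDITION & SPEC =====
-- Pre_ excludes: matrix = [] and matrix rows shorter than matrix[0] (A raises IndexError there),
-- and word lists containing the empty string unless every scanned cell is empty, because on a
-- nonempty column string A's count_word loops forever on the word ''.
def Pre_check_down (result_dict : List (String × Int)) (word_list : List String)
    (matrix : List (List String)) : Prop :=
  matrix ≠ [] ∧ (∀ row ∈ matrix, (PySem.List.pyGetD matrix 0 []).length ≤ row.length) ∧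
    ("" ∈ word_list →
      ∀ row ∈ matrix, ∀ c ∈ row.take (PySem.List.pyGetD matrix 0 []).length, c = "")
instance (result_dict : List (String × Int)) (word_list : List String) (matrix : List (List String)) : Decidable (Pre_check_down result_dict word_list matrix) := by unfold Pre_check_down; infer_instance

def pvWitness_check_down : (List (String × Int)) × List String × List (List String) :=
  ([("ab", 1)], ["a", "ba"], [["a", "b"], ["c", "a"]])

def Spec_check_down (result_dict : List (String × Int)) (word_list : List String) (matrix : List (List String)) (out : List (String × Int)) : Prop := out = check_down_alt result_dict word_list matrix
instance (result_dict : List (String × Int)) (word_list : List String) (matrix : List (List String)) (out : List (String × Int)) : Decidable (Spec_check_down result_dict word_list matrix out) := by unfold Spec_check_down; infer_instance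

-- ===== CLAIM (what is proved, stated in full; the proofs are below) =====
def Claim_equal_check_down : Prop := ∀ (result_dict : List (String × Int)) (word_list : List String) (matrix : List (List String)), Dom_check_down result_dict word_list matrix → Pre_check_down result_dict word_list matrix → Spec_check_down result_dict word_list matrix (check_down result_dict word_list matrix)

-- ===== LEMMAS AND PROOFS =====

-- number of start indexes j < s.length with W a prefix of s.drop j (= overlapping occurrences for W ≠ [])
def occ (W : List Char) : List Char → Nat
  | [] => 0
  | c :: t => (if W <+: (c :: t) then 1 else 0) + occ W t

theorem occ_zero_of_short {W : List Char} :
    ∀ {s : List Char}, s.length < W.length → occ W s = 0 := by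
  intro s
  induction s with
  | nil => intro _; rfl
  | cons c t ih =>
    intro h
    have h1 : ¬ W <+: (c :: t) := fun hp => by
      have := hp.length_le; simp [List.length_cons] at this h; omega
    have h2 : t.length < W.length := by simp [List.length_cons] at h; omega
    simp [occ, h1, ih h2]

theorem occ_pos_iff {W : List Char} (hW : W ≠ []) :
    ∀ {s : List Char}, 0 < occ W s ↔ ∃ j, W <+: s.drop j := by
  intro s
  induction s with
  | nil => simp [occ, List.prefix_nil, hW]
  | cons c t ih =>
    constructor
    · intro h
      by_cases hp : W <+: (c :: t)
      · exact ⟨0, hp⟩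
      · simp only [occ, hp, if_false, Nat.zero_add] at h
        obtain ⟨j, hj⟩ := ih.mp h
        exact ⟨j + 1, by simpa [List.drop_succ_cons] using hj⟩
    · rintro ⟨j, hj⟩
      cases j with
      | zero =>
        simp only [List.drop_zero] at hj
        simp [occ, hj]
      | succ j =>
        have h1 : 0 < occ W t := ih.mpr ⟨j, by simpa [List.drop_succ_cons] using hj⟩
        simp only [occ]
        split_ifs <;> omega

theorem occ_drop_of_no_prefix {W : List Char} :
    ∀ (m : Nat) (s : List Char), (∀ j < m, ¬ W <+: s.drop j) → occ W s = occ W (s.drop m) := by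
  intro m
  induction m with
  | zero => intro s _; simp
  | succ m ih =>
    intro s h
    have h1 : occ W s = occ W (s.drop m) := ih s (fun j hj => h j (by omega))
    have h2 : ¬ W <+: s.drop m := h m (by omega)
    rw [h1]
    cases hd : s.drop m with
    | nil =>
      have h3 : s.drop (m + 1) = [] := by rw [← List.tail_drop, hd]; rfl
      rw [h3]
    | cons c u =>
      have hu : u = s.drop (m + 1) := by rw [← List.tail_drop, hd]; rfl
      rw [hd] at h2
      rw [← hu]
      simp [occ, h2]

-- the first occurrence splits the count: occ s = 1 + occ (s.drop (find+1))
theorem occ_find_succ {W s : List Char} (hW : W ≠ []) (h : PySem.Chars.isIn W s = true) :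
    (PySem.Chars.find s W).toNat < s.length ∧
    occ W s = 1 + occ W (s.drop ((PySem.Chars.find s W).toNat + 1)) := by
  have hinf : W <:+: s := (PySem.Chars.isIn_iff_infix W s).mp h
  have hnn : 0 ≤ PySem.Chars.find s W := (PySem.Chars.find_nonneg_iff s W).mpr hinf
  obtain ⟨hpre, hmin⟩ := PySem.Chars.find_spec hnn
  have hflt : (PySem.Chars.find s W).toNat < s.length := by
    by_contra hle
    have : s.drop (PySem.Chars.find s W).toNat = [] := List.drop_eq_nil_of_le (by omega)
    rw [this, List.prefix_nil] at hpre
    exact hW hpre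
  refine ⟨hflt, ?_⟩
  rw [occ_drop_of_no_prefix (PySem.Chars.find s W).toNat s hmin]
  cases hd : s.drop (PySem.Chars.find s W).toNat with
  | nil =>
    exfalso
    rw [hd, List.prefix_nil] at hpre
    exact hW hpre
  | cons c u =>
    have hu : u = s.drop ((PySem.Chars.find s W).toNat + 1) := by
      rw [← List.tail_drop, hd]; rfl
    rw [hd] at hpre
    rw [← hu]
    simp [occ, hpre]

theorem count_word_loop_eq {W : List Char} (hW : W ≠ []) :
    ∀ (fuel : Nat) (short : List Char) (count : Int), short.length < fuel →
      count_word_loop W fuel short count = count + (occ W short : Int) := by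
  intro fuel
  induction fuel with
  | zero => intro short count h; omega
  | succ fuel ih =>
    intro short count h
    by_cases hin : PySem.Chars.isIn W short = true
    · obtain ⟨hflt, hocc⟩ := occ_find_succ hW hin
      have hnn : 0 ≤ PySem.Chars.find short W :=
        (PySem.Chars.find_nonneg_iff short W).mpr ((PySem.Chars.isIn_iff_infix W short).mp hin)
      have hslice : PySem.Chars.slice short (some (PySem.Chars.find short W + 1)) none
          = short.drop ((PySem.Chars.find short W).toNat + 1) := by
        rw [PySem.Chars.slice_eq_listSlice, PySem.List.slice_from short (by omega)]
        congr 1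
        omega
      have hlen : (short.drop ((PySem.Chars.find short W).toNat + 1)).length < fuel := by
        rw [List.length_drop]; omega
      simp only [count_word_loop, hin, if_true, hslice, ih _ _ hlen, hocc]
      push_cast
      ring
    · have h0 : occ W short = 0 := by
        by_contra hne
        exact hin ((PySem.Chars.exists_prefix_drop_iff_isIn W short).mp
          ((occ_pos_iff hW).mp (by omega)))
      simp [count_word_loop, hin, h0]

theorem count_word_eq {W s : List Char} (hW : W ≠ []) (h : PySem.Chars.isIn W s = true) :
    count_word W s = (occ W s : Int) := by
  have hs : s ≠ [] := by
    rintro rfl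
    exact hW (List.infix_nil.mp ((PySem.Chars.isIn_iff_infix W []).mp h))
  obtain ⟨hflt, hocc⟩ := occ_find_succ hW h
  have hnn : 0 ≤ PySem.Chars.find s W :=
    (PySem.Chars.find_nonneg_iff s W).mpr ((PySem.Chars.isIn_iff_infix W s).mp h)
  have hslice : PySem.Chars.slice s (some (PySem.Chars.find s W + 1)) none
      = s.drop ((PySem.Chars.find s W).toNat + 1) := by
    rw [PySem.Chars.slice_eq_listSlice, PySem.List.slice_from s (by omega)]
    congr 1
    omega
  have hlen : (s.drop ((PySem.Chars.find s W).toNat + 1)).length < s.length + 1 := by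
    rw [List.length_drop]; omega
  unfold count_word
  simp only [hs, if_false, hslice, count_word_loop_eq hW _ _ _ hlen, hocc]
  push_cast
  ring

theorem occ_eq_countP {W : List Char} (hW : W ≠ []) :
    ∀ (s : List Char),
      (List.range (s.length + 1 - W.length)).countP (fun k => decide (W <+: s.drop k)) = occ W s := by
  have hWpos : 0 < W.length := List.length_pos_iff.mpr hW
  intro s
  induction s with
  | nil =>
    have : 0 + 1 - W.length = 0 := by omega
    simp [this, occ]
  | cons c t ih =>
    by_cases hle : W.length ≤ t.length + 1
    · have hn : (c :: t).length + 1 - W.length = (t.length + 1 - W.length) + 1 := by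
        simp only [List.length_cons]; omega
      rw [hn, List.range_succ_eq_map, List.countP_cons, List.countP_map]
      have hcongr : (List.range (t.length + 1 - W.length)).countP
            ((fun k => decide (W <+: (c :: t).drop k)) ∘ Nat.succ)
          = (List.range (t.length + 1 - W.length)).countP (fun k => decide (W <+: t.drop k)) := by
        refine List.countP_congr (fun k _ => ?_)
        simp [Function.comp, List.drop_succ_cons]
      rw [hcongr, ih]
      by_cases hp : W <+: (c :: t) <;> · simp [occ, hp]; try omega
    · have hn : (c :: t).length + 1 - W.length = 0 := by simp only [List.length_cons]; omega
      rw [hn]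
      have : occ W (c :: t) = 0 := occ_zero_of_short (by simp only [List.length_cons]; omega)
      simp [this]

theorem count_windows_eq {W col : List Char} (hW : W ≠ []) :
    count_windows W col = (occ W col : Int) := by
  unfold count_windows
  rw [PySem.List.foldl_ite_add_one]
  rw [PySem.List.pyRange_one]
  rw [List.countP_map]
  have hcongr : (List.range (((col.length : Int) - (W.length : Int) + 1 - 0).toNat)).countP
        ((fun s => decide (PySem.List.slice col (some s) (some (s + (W.length : Int))) = W))
          ∘ (fun k : Nat => (0 : Int) + k))
      = (List.range (((col.length : Int) - (W.length : Int) + 1 - 0).toNat)).countP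
        (fun k => decide (W <+: col.drop k)) := by
    refine List.countP_congr (fun k _ => ?_)
    simp only [Function.comp, zero_add, decide_eq_true_eq]
    rw [PySem.List.slice_natCast_add col k W.length]
    constructor
    · intro he
      exact List.prefix_iff_eq_take.mpr (by rw [← he]; simp)
    · intro hp
      have := List.prefix_iff_eq_take.mp hp
      rw [← this]
  rw [hcongr]
  have hn : ((col.length : Int) - (W.length : Int) + 1 - 0).toNat = col.length + 1 - W.length := by
    omega
  rw [hn, occ_eq_countP hW]
  omega

theorem dict_step (d : PySem.Dict String Int) (k : String) (c : Int) :
    (if d.contains k then d.modify k 0 (fun v => v + c) else d.insert k c)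
      = d.insert k (d.getD k 0 + c) := by
  by_cases h : d.contains k
  · simp [h, PySem.Dict.modify]
  · have hc : d.contains k = false := eq_false_of_ne_true h
    have h0 : d.getD k 0 = 0 := PySem.Dict.getD_of_not_contains d 0 hc
    simp [h, h0]

theorem word_step_eq (s : List Char) (w : String) (hw : w ≠ "" ∨ s = [])
    (d : PySem.Dict String Int) :
    (if PySem.Chars.isIn w.toList s then
      if d.contains w then d.modify w 0 (fun v => v + count_word w.toList s)
      else d.insert w (count_word w.toList s)
    else d)
    = (let cnt := count_windows w.toList s;
       if cnt > 0 then d.insert w (d.getD w 0 + cnt) else d) := by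
  by_cases hwe : w.toList = []
  · have hw0 : w = "" := String.toList_eq_nil_iff.mp hwe
    have hs : s = [] := by
      rcases hw with h | h
      · exact absurd hw0 h
      · exact h
    subst hs
    rw [hwe]
    have hcw : count_word [] [] = 1 := rfl
    have hcn : count_windows [] [] = 1 := rfl
    have hisin : PySem.Chars.isIn [] [] = true := rfl
    simp only [hisin, if_true, hcw, hcn]
    rw [dict_step]
    norm_num
  have hW : w.toList ≠ [] := hwe
  by_cases hin : PySem.Chars.isIn w.toList s = true
  · have hpos : 0 < occ (w.toList) s :=
      (occ_pos_iff hW).mpr ((PySem.Chars.exists_prefix_drop_iff_isIn w.toList s).mpr hin)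
    have hcnt : count_windows w.toList s = (occ w.toList s : Int) := count_windows_eq hW
    simp only [hin, if_true, count_word_eq hW hin, hcnt]
    rw [dict_step]
    simp
    intro h0
    exact absurd h0 (by omega)
  · have h0 : occ (w.toList) s = 0 := by
      by_contra hne
      exact hin ((PySem.Chars.exists_prefix_drop_iff_isIn w.toList s).mp
        ((occ_pos_iff hW).mp (by omega)))
    have hcnt : count_windows w.toList s = 0 := by rw [count_windows_eq hW, h0]; rfl
    simp [hin, hcnt]

-- ===== VERDICT (by name: the statement is the Claim_ definition above) =====
theorem check_down_spec : Claim_equal_check_down := by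
  intro rd wl m _ hpre
  obtain ⟨-, hrows, hempty⟩ := hpre
  unfold Spec_check_down check_down check_down_alt
  refine congrArg PySem.Dict.items ?_
  apply PySem.List.foldl_congr_mem
  intro d j hj
  dsimp only
  rw [PySem.List.foldl_append_eq_flatMap]
  simp only [List.nil_append]
  unfold check_and_update
  apply PySem.List.foldl_congr_mem
  intro d' w hw
  apply word_step_eq
  by_cases hwe : w = ""
  · right
    obtain ⟨hj0, hjlt⟩ := PySem.List.mem_pyRange_one.mp hj
    refine List.flatMap_eq_nil_iff.mpr ?_
    intro i hi
    obtain ⟨hi0, hilt⟩ := PySem.List.mem_pyRange_one.mp hi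
    have him : i.toNat < m.length := by omega
    have hrow : PySem.List.pyGetD m i [] = m[i.toNat] :=
      PySem.List.pyGetD_eq_getElem m [] hi0 hilt
    have hmem : m[i.toNat] ∈ m := List.getElem_mem him
    have hlen : (PySem.List.pyGetD m 0 []).length ≤ (m[i.toNat]).length := hrows _ hmem
    have hcell : PySem.List.pyGetD (m[i.toNat]) j "" = (m[i.toNat])[j.toNat]'(by omega) :=
      PySem.List.pyGetD_eq_getElem _ "" hj0 (by omega)
    have hlt : j.toNat < ((m[i.toNat]).take (PySem.List.pyGetD m 0 []).length).length := by
      simp only [List.length_take]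
      omega
    have htake : (m[i.toNat])[j.toNat]'(by omega)
        ∈ (m[i.toNat]).take (PySem.List.pyGetD m 0 []).length := by
      rw [← List.getElem_take (h := hlt)]
      exact List.getElem_mem hlt
    have hcempty : (m[i.toNat])[j.toNat]'(by omega) = "" := hempty (hwe ▸ hw) _ hmem _ htake
    rw [hrow, hcell, hcempty]
    rfl
  · left
    exact hwe
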